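-- pv_equiv track=rewrite | github.com/Transconnectome/BrainVLM | UMBRELLA/project/training/umbrella_utils.py | is_interleaved
-- ===== SOURCE A (Python) =====
-- def is_interleaved(conversation: list) -> bool:
--     """
--     Check if conversation uses interleaved format (text before images).
--
--     Args:
--         conversation: JSON conversation list
--
--     Returns:
--         True if interleaved format is detected
--     """
--     for turn in conversation:
--         content = turn.get("content", [])
--         last_was_text = False
--
--         for item in content:
--             item_type = item.get("type", "")
--             if item_type.startswith("image"):
--                 if last_was_text:
--                     return True
--                 last_was_text = False
--             elif item_type == "text":
--                 last_was_text = True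
--
--     return False
-- ===== SOURCE B (Python) =====
-- def is_interleaved(conversation: list) -> bool:
--     """Projection + pairwise scan: keep only text/image items, look for a text->image adjacency."""
--     for turn in conversation:
--         seq = [t for t in (item.get("type", "") for item in turn.get("content", []))
--                if t == "text" or t.startswith("image")]
--         if any(a == "text" and b.startswith("image") for a, b in zip(seq, seq[1:])):
--             return True
--     return False
-- ===== Notes on version B (the rewrite author's own statement) =====
-- stated objective: alternative
-- what changed: Replaces the stateful last_was_text flag scan with a stateless projection of each turn's content to its text/image item types followed by an adjacent-pair check for a text followed by an image.
import Mathlib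
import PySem

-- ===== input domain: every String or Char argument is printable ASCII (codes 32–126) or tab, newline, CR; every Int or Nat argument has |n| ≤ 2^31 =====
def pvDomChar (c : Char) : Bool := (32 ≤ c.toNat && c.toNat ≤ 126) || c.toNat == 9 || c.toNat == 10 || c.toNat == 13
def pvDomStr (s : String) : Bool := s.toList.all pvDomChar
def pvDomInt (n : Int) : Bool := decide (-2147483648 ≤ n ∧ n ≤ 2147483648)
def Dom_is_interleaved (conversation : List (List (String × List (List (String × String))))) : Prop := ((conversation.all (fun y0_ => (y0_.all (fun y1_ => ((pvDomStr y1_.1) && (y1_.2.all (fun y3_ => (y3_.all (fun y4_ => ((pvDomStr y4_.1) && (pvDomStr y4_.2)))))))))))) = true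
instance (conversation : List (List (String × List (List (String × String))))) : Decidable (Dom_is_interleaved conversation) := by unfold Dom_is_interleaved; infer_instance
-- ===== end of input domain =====

-- B replaces A's stateful last_was_text flag scan with a stateless projection of each
-- turn's content to its text/image types followed by an adjacent-pair check (alternative decomposition).


-- ===== PORT A =====
-- d.get(k, dflt) on the association-list encoding of a Python dict
def pvGetD {ν : Type} (d : List (String × ν)) (k : String) (dflt : ν) : ν :=
  (PySem.Dict.mk d).getD k dflt

-- A's inner loop: stateful scan with the last_was_text flag; returning true = A's 'return True'
def aScan (content : List (List (String × String))) (lastWasText : Bool) : Bool :=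
  match content with
  | [] => false
  | item :: rest =>
    let itemType := pvGetD item "type" ""
    if PySem.Str.startswith itemType "image" then
      if lastWasText then true else aScan rest false
    else if itemType == "text" then aScan rest true
    else aScan rest lastWasText

-- A's outer loop over turns (early return on True)
def is_interleaved (conversation : List (List (String × List (List (String × String))))) : Bool :=
  match conversation with
  | [] => false
  | turn :: rest =>
    if aScan (pvGetD turn "content" []) false then true else is_interleaved rest

-- ===== PORT B =====
-- the projected sequence of item types restricted to text / image-prefixed ones
def projTypes (content : List (List (String × String))) : List String :=
  (content.map (fun item => pvGetD item "type" "")).filter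
    (fun t => t == "text" || PySem.Str.startswith t "image")

-- any(a == 'text' and b.startswith('image') for a, b in zip(seq, seq[1:]))
def hasTextImagePair (seq : List String) : Bool :=
  (seq.zip seq.tail).any (fun p => p.1 == "text" && PySem.Str.startswith p.2 "image")

def is_interleaved_alt (conversation : List (List (String × List (List (String × String))))) : Bool :=
  conversation.any (fun turn => hasTextImagePair (projTypes (pvGetD turn "content" [])))

-- ===== PRECONDITION & SPEC =====
def Spec_is_interleaved (conversation : List (List (String × List (List (String × String))))) (out : Bool) : Prop := out = is_interleaved_alt conversation
instance (conversation : List (List (String × List (List (String × String))))) (out : Bool) : Decidable (Spec_is_interleaved conversation out) := by unfold Spec_is_interleaved; infer_instance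

-- ===== CLAIM (what is proved, stated in full; the proofs are below) =====
def Claim_equal_is_interleaved : Prop := ∀ (conversation : List (List (String × List (List (String × String))))), Dom_is_interleaved conversation → Spec_is_interleaved conversation (is_interleaved conversation)

-- ===== LEMMAS AND PROOFS =====

-- head of the projected sequence is an image item
def firstIsImage (seq : List String) : Bool :=
  match seq with
  | [] => false
  | t :: _ => PySem.Str.startswith t "image"

-- A's flag scan, re-expressed on an already-projected sequence
def pairAux (last : Bool) (seq : List String) : Bool :=
  match seq with
  | [] => false
  | t :: ts =>
    if PySem.Str.startswith t "image" then (last || pairAux false ts)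
    else pairAux (t == "text") ts

theorem startswith_image_ne_text (t : String) (h : PySem.Str.startswith t "image" = true) :
    (t == "text") = false := by
  by_contra hne
  have ht : t = "text" := by
    have := eq_of_beq (a := t) (b := "text") (by revert hne; cases t == "text" <;> simp)
    exact this
  subst ht
  exact absurd h (by decide)

theorem hasPair_cons_cons (t u : String) (us : List String) :
    hasTextImagePair (t :: u :: us) =
      ((t == "text" && PySem.Str.startswith u "image") || hasTextImagePair (u :: us)) := by
  simp [hasTextImagePair]

theorem pairAux_eq_hasPair (seq : List String)
    (hseq : ∀ t ∈ seq, (t == "text" || PySem.Str.startswith t "image") = true) :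
    ∀ last, pairAux last seq = ((last && firstIsImage seq) || hasTextImagePair seq) := by
  induction seq with
  | nil => intro last; simp [pairAux, firstIsImage, hasTextImagePair]
  | cons t ts ih =>
    intro last
    have hts : ∀ x ∈ ts, (x == "text" || PySem.Str.startswith x "image") = true := by
      intro x hx; exact hseq x (List.mem_cons_of_mem _ hx)
    by_cases himg : PySem.Str.startswith t "image" = true
    · have hne := startswith_image_ne_text t himg
      have hpair : hasTextImagePair (t :: ts) = hasTextImagePair ts := by
        cases ts with
        | nil => simp [hasTextImagePair]
        | cons u us => rw [hasPair_cons_cons]; simp [hne]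
      simp only [pairAux, himg, if_true, ih hts, hpair, firstIsImage]
      cases last <;> simp
    · have himg' : PySem.Str.startswith t "image" = false := by
        cases h : PySem.Str.startswith t "image" <;> simp_all
      have htext : (t == "text") = true := by
        have h0 := hseq t (List.mem_cons_self ..)
        rw [himg'] at h0; simpa using h0
      simp only [pairAux, himg', Bool.false_eq_true, if_false, ih hts, htext, firstIsImage]
      cases ts with
      | nil => simp [hasTextImagePair]
      | cons u us => rw [hasPair_cons_cons]; simp [htext]

theorem aScan_eq_pairAux (content : List (List (String × String))) :
    ∀ last, aScan content last = pairAux last (projTypes content) := by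
  induction content with
  | nil => intro last; simp [aScan, pairAux, projTypes]
  | cons item rest ih =>
    intro last
    have hproj : projTypes (item :: rest) =
        if ((pvGetD item "type" "") == "text" || PySem.Str.startswith (pvGetD item "type" "") "image")
        then (pvGetD item "type" "") :: projTypes rest else projTypes rest := by
      simp [projTypes, List.filter_cons]
    cases himg : PySem.Str.startswith (pvGetD item "type" "") "image" with
    | true =>
      rw [hproj]
      simp only [himg, Bool.or_true, if_true]
      simp only [aScan, pairAux, himg, if_true, ih]
      cases last <;> simp
    | false =>
      cases htext : pvGetD item "type" "" == "text" with
      | true =>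
        rw [hproj]
        simp only [htext, Bool.true_or, if_true]
        simp only [aScan, pairAux, himg, Bool.false_eq_true, if_false, htext, ih]
        simp
      | false =>
        rw [hproj]
        simp only [htext, himg, Bool.or_self, Bool.false_eq_true, if_false]
        simp only [aScan, himg, Bool.false_eq_true, if_false, htext, ih]

theorem aScan_eq_hasPair (content : List (List (String × String))) :
    aScan content false = hasTextImagePair (projTypes content) := by
  have h := pairAux_eq_hasPair (projTypes content)
    (fun t ht => (List.mem_filter.mp ht).2) false
  rw [aScan_eq_pairAux, h]; simp

theorem ports_agree (conversation : List (List (String × List (List (String × String))))) :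
    is_interleaved conversation = is_interleaved_alt conversation := by
  induction conversation with
  | nil => rfl
  | cons turn rest ih =>
    show (if aScan (pvGetD turn "content" []) false then true else is_interleaved rest) = _
    rw [aScan_eq_hasPair, ih]
    simp only [is_interleaved_alt, List.any_cons]
    cases hasTextImagePair (projTypes (pvGetD turn "content" [])) <;> simp

-- ===== VERDICT (by name: the statement is the Claim_ definition above) =====
theorem is_interleaved_spec : Claim_equal_is_interleaved := by
  intro conversation _
  exact ports_agree conversation
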